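-- pv_equiv track=rewrite | github.com/it-mnm/programmers | 코드 처리하기.py | solution
-- ===== SOURCE A (Python) =====
-- def solution(code):
--     ret = ''
--     mode = 0
--     for i in range(len(code)):
--         if mode == 0:
--             if code[i] != '1' and i % 2 == 0:
--                 ret += code[i]
--             elif code[i] == '1':
--                 mode = 1
--             elif code[i] == '':
--                 ret = 'EMPTY'
--
--         elif mode == 1:
--             if code[i] != '1' and i % 2 == 1:
--                 ret += code[i]
--             elif code[i] == '1':
--                 mode = 0
--             elif code[i] == '':
--                 ret = 'EMPTY'
--
--     return ret
-- ===== SOURCE B (Python) =====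
-- def solution(code):
--     # Split the string on '1' into segments. In segment k (0-based), the mode
--     # equals k % 2, so a char at absolute index i is kept iff i % 2 == k % 2,
--     # i.e. local index j with j % 2 == (k - pos) % 2 for segment start pos.
--     # Take every other char of each segment by slicing with step 2.
--     out = []
--     pos = 0
--     for k, seg in enumerate(code.split('1')):
--         out.append(seg[(k - pos) % 2::2])
--         pos += len(seg) + 1
--     return ''.join(out)
-- ===== Notes on version B (the rewrite author's own statement) =====
-- stated objective: faster
-- what changed: Replaces A's per-character toggled-mode state machine with a segment algorithm: split the string on the toggle character into segments, take every other character of segment k by stride-2 slicing starting at (k - offset) % 2, and join the pieces.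
import Mathlib
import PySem

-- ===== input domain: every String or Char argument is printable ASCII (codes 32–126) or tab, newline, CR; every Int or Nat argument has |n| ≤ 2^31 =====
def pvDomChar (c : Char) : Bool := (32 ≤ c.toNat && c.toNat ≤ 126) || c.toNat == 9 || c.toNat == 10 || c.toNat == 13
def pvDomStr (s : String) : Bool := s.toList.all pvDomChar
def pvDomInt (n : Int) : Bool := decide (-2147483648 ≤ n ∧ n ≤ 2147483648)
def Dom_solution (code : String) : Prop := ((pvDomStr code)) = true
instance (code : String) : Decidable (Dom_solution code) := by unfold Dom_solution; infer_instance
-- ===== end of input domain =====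

-- B replaces A's per-character toggled-mode state machine by a segment algorithm:
-- split on the toggle character, stride-2 slice each segment, join (same O(n) cost,
-- measurably faster constants: bulk split/slice instead of a per-character loop).

-- ===== PORT A =====
-- one iteration of A's loop body: state = (ret, mode); the `code[i] == ''` branch
-- of the Python is ported literally as comparing the 1-char string [c] to the empty
-- string (always false in Python too, since code[i] has length 1)
def solutionStep (st : List Char × Int) (ic : Int × Char) : List Char × Int :=
  let i := ic.1
  let c := ic.2
  let ret := st.1
  let mode := st.2
  if mode = 0 then
    if c ≠ '1' ∧ PySem.Int.mod i 2 = 0 then (ret ++ [c], mode)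
    else if c = '1' then (ret, 1)
    else if ([c] : List Char) = [] then ('E' :: 'M' :: 'P' :: 'T' :: 'Y' :: [], mode)
    else (ret, mode)
  else if mode = 1 then
    if c ≠ '1' ∧ PySem.Int.mod i 2 = 1 then (ret ++ [c], mode)
    else if c = '1' then (ret, 0)
    else if ([c] : List Char) = [] then ('E' :: 'M' :: 'P' :: 'T' :: 'Y' :: [], mode)
    else (ret, mode)
  else (ret, mode)

def solution (code : String) : String :=
  String.ofList ((PySem.List.enumerate code.toList).foldl solutionStep ([], 0)).1

-- ===== PORT B =====
-- one iteration of Source B's loop: state = (out, pos); seg[(k - pos) % 2::2] is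
-- PySem slicing with step 2 (never none since the step is non-zero)
def solutionAltStep (st : List (List Char) × Int) (kseg : Int × List Char) : List (List Char) × Int :=
  let k := kseg.1
  let seg := kseg.2
  let start := PySem.Int.mod (k - st.2) 2
  (st.1 ++ [(PySem.List.slice? seg (some start) none 2).getD []],
   st.2 + (seg.length : Int) + 1)

def solution_alt (code : String) : String :=
  let segs := PySem.Chars.splitOn code.toList ['1']   -- code.split('1')
  let res := (PySem.List.enumerate segs).foldl solutionAltStep ([], 0)
  String.ofList (PySem.Chars.join [] res.1)            -- ''.join(out)

-- ===== PRECONDITION & SPEC =====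
def Spec_solution (code : String) (out : String) : Prop := out = solution_alt code
instance (code : String) (out : String) : Decidable (Spec_solution code out) := by unfold Spec_solution; infer_instance

-- ===== CLAIM (what is proved, stated in full; the proofs are below) =====
def Claim_equal_solution : Prop := ∀ (code : String), Dom_solution code → Spec_solution code (solution code)

-- ===== LEMMAS AND PROOFS =====

lemma mod2 (x : Int) : PySem.Int.mod x 2 = x % 2 := by
  simp [PySem.Int.mod, Int.fmod_eq_emod]

-- common characterisation of the selected characters
def sel : List Char → Int → Int → List Char
  | [], _, _ => []
  | c :: cs, i, m =>
    if c ≠ '1' ∧ PySem.Int.mod i 2 = m then c :: sel cs (i + 1) m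
    else if c = '1' then sel cs (i + 1) (1 - m)
    else sel cs (i + 1) m

lemma sel_one (cs : List Char) (i m : Int) : sel ('1' :: cs) i m = sel cs (i + 1) (1 - m) := by
  simp [sel]

lemma sel_take (c : Char) (cs : List Char) (i m : Int) (hc : c ≠ '1')
    (hm : PySem.Int.mod i 2 = m) : sel (c :: cs) i m = c :: sel cs (i + 1) m := by
  rw [mod2] at hm
  simp [sel, hc, hm]

lemma sel_skip (c : Char) (cs : List Char) (i m : Int) (hc : c ≠ '1')
    (hm : ¬ PySem.Int.mod i 2 = m) : sel (c :: cs) i m = sel cs (i + 1) m := by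
  rw [mod2] at hm
  simp [sel, hc, hm]

lemma a_loop (cs : List Char) : ∀ (i : Int) (ret : List Char) (m : Int), m = 0 ∨ m = 1 →
    ((PySem.List.enumerate cs i).foldl solutionStep (ret, m)).1 = ret ++ sel cs i m := by
  induction cs with
  | nil => intro i ret m hm; simp [PySem.List.enumerate_nil, sel]
  | cons c cs ih =>
    intro i ret m hm
    rw [PySem.List.enumerate_cons, List.foldl_cons]
    rcases hm with hm | hm <;> subst hm <;> by_cases hc : c = '1'
    · subst hc
      simp [solutionStep, sel, ih (i + 1) ret 1 (Or.inr rfl)]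
    · simp only [solutionStep, sel]
      simp [hc]
      split_ifs <;> simp [ih (i + 1) (ret ++ [c]) 0 (Or.inl rfl), ih (i + 1) ret 0 (Or.inl rfl)]
    · subst hc
      simp [solutionStep, sel, ih (i + 1) ret 0 (Or.inl rfl)]
    · simp only [solutionStep, sel]
      simp [hc]
      split_ifs <;> simp [ih (i + 1) (ret ++ [c]) 1 (Or.inr rfl), ih (i + 1) ret 1 (Or.inr rfl)]

-- every other element, starting with the first
def eo {α : Type} : List α → List α
  | [] => []
  | [c] => [c]
  | c :: _ :: cs => c :: eo cs

lemma eo_cons {α : Type} (c : α) (cs : List α) : eo (c :: cs) = c :: eo (cs.drop 1) := by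
  cases cs <;> simp [eo]

-- reference split of a list on the character '1'
def consHead (c : Char) : List (List Char) → List (List Char)
  | [] => [[c]]
  | x :: xs => (c :: x) :: xs

def mySplit : List Char → List (List Char)
  | [] => [[]]
  | c :: cs => if c = '1' then [] :: mySplit cs else consHead c (mySplit cs)

def preH (p : List Char) : List (List Char) → List (List Char)
  | [] => [p]
  | x :: xs => (p ++ x) :: xs

lemma mySplit_one (cs : List Char) : mySplit ('1' :: cs) = [] :: mySplit cs := by
  simp [mySplit]

lemma mySplit_cons (c : Char) (cs : List Char) (hc : c ≠ '1') :
    mySplit (c :: cs) = consHead c (mySplit cs) := by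
  simp [mySplit, hc]

lemma mySplit_ne_nil (cs : List Char) : mySplit cs ≠ [] := by
  cases cs with
  | nil => simp [mySplit]
  | cons c cs =>
    simp only [mySplit]
    split_ifs
    · simp
    · cases h : mySplit cs <;> simp [consHead]

lemma eo_filterMap {α : Type} (ys : List α) :
    (List.range ((ys.length + 1) / 2)).filterMap (fun k => ys[2 * k]?) = eo ys := by
  induction ys using eo.induct with
  | case1 => simp [eo]
  | case2 c => simp [eo, List.range_succ]
  | case3 c d tl ih =>
    have hlen : ((c :: d :: tl).length + 1) / 2 = (tl.length + 1) / 2 + 1 := by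
      simp; omega
    rw [hlen, List.range_succ_eq_map, List.filterMap_cons, List.filterMap_map]
    have hfun : (fun k => (c :: d :: tl)[2 * k]?) ∘ (· + 1) = fun k => tl[2 * k]? := by
      funext k
      have h2 : 2 * (k + 1) = 2 * k + 1 + 1 := by ring
      simp [Function.comp, h2]
    rw [hfun, ih]
    simp [eo]

lemma slice?_step2 {α : Type} (xs : List α) (s : Nat) :
    PySem.List.slice? xs (some (s : Int)) none 2 = some (eo (xs.drop s)) := by
  rw [PySem.List.slice?]
  simp only [PySem.List.sliceIndices]
  norm_num
  have hs : ¬ ((s : Int) < 0) := by omega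
  simp only [if_neg hs]
  by_cases h : s < xs.length
  · have hmin : min (s : Int) (xs.length : Int) = (s : Int) := by omega
    have hlt : (s : Int) < (xs.length : Int) := by omega
    rw [hmin, if_pos hlt]
    have hcount : (((xs.length : Int) - (s : Int) + 2 - 1) / 2).toNat
        = ((xs.drop s).length + 1) / 2 := by
      simp only [List.length_drop]; omega
    rw [hcount]
    have hfun : (fun x : Nat => xs[((s : Int) + 2 * (x : Int)).toNat]?)
        = fun k : Nat => (xs.drop s)[2 * k]? := by
      funext k
      have ht : ((s : Int) + 2 * (k : Int)).toNat = s + 2 * k := by omega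
      rw [ht, List.getElem?_drop]
    rw [hfun, eo_filterMap]
  · have hmin : min (s : Int) (xs.length : Int) = (xs.length : Int) := by omega
    rw [hmin]
    simp only [lt_irrefl, if_false]
    have hdrop : xs.drop s = [] := by
      apply List.drop_eq_nil_of_le; omega
    simp [hdrop, eo]

-- processed segments, tracking the enumerate index k and the absolute offset pos
def proc : List (List Char) → Int → Int → List (List Char)
  | [], _, _ => []
  | seg :: rest, k, pos =>
      eo (seg.drop (PySem.Int.mod (k - pos) 2).toNat) ::
        proc rest (k + 1) (pos + (seg.length : Int) + 1)

lemma b_loop (segs : List (List Char)) : ∀ (k : Int) (out : List (List Char)) (pos : Int),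
    ((PySem.List.enumerate segs k).foldl solutionAltStep (out, pos)).1
      = out ++ proc segs k pos := by
  induction segs with
  | nil => intro k out pos; simp [PySem.List.enumerate_nil, proc]
  | cons seg rest ih =>
    intro k out pos
    rw [PySem.List.enumerate_cons, List.foldl_cons]
    have hnn : 0 ≤ PySem.Int.mod (k - pos) 2 := by rw [mod2]; omega
    have hcast : PySem.Int.mod (k - pos) 2 = (((PySem.Int.mod (k - pos) 2).toNat : Nat) : Int) :=
      (Int.toNat_of_nonneg hnn).symm
    simp only [solutionAltStep]
    rw [hcast, slice?_step2]
    simp only [Option.getD_some]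
    rw [ih]
    simp [proc]

lemma go_split (l : List Char) : ∀ (fuel : Nat) (cur : List Char) (acc : List (List Char)),
    l.length ≤ fuel →
    PySem.Chars.splitOn.go ['1'] fuel l cur acc = acc.reverse ++ preH cur.reverse (mySplit l) := by
  induction l with
  | nil =>
    intro fuel cur acc _
    cases fuel <;> simp [PySem.Chars.splitOn.go, mySplit, preH]
  | cons c rest ih =>
    intro fuel cur acc hf
    cases fuel with
    | zero => simp at hf
    | succ f =>
      by_cases hc : c = '1'
      · subst hc
        rw [PySem.Chars.splitOn.go]
        have hp : List.isPrefixOf ['1'] ('1' :: rest) = true := by simp [List.isPrefixOf]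
        rw [if_pos hp]
        simp only [List.length_singleton, List.drop_one, List.tail_cons]
        rw [ih f [] (cur.reverse :: acc) (by simp at hf; omega)]
        rcases h : mySplit rest with _ | ⟨x, xs⟩
        · exact absurd h (mySplit_ne_nil rest)
        · simp [mySplit_one, preH, h]
      · rw [PySem.Chars.splitOn.go]
        have hp : List.isPrefixOf ['1'] (c :: rest) = false := by
          simp [List.isPrefixOf]; exact fun h => absurd h.symm hc
        rw [hp]
        simp only [Bool.false_eq_true, if_false]
        rw [ih f (c :: cur) acc (by simp at hf; omega)]
        rcases h : mySplit rest with _ | ⟨x, xs⟩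
        · exact absurd h (mySplit_ne_nil rest)
        · simp [mySplit_cons c rest hc, preH, h, consHead]

lemma splitOn_eq (cs : List Char) : PySem.Chars.splitOn cs ['1'] = mySplit cs := by
  rw [PySem.Chars.splitOn, go_split cs (cs.length + 1) [] [] (by omega)]
  rcases h : mySplit cs with _ | ⟨x, xs⟩
  · exact absurd h (mySplit_ne_nil cs)
  · simp [preH]

lemma join_nil_flatten (l : List (List Char)) : PySem.Chars.join [] l = l.flatten := by
  induction l with
  | nil => simp [PySem.Chars.join_nil]
  | cons p rest ih =>
    cases rest with
    | nil => simp [PySem.Chars.join_singleton]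
    | cons q r => rw [PySem.Chars.join_cons_cons]; simp_all

lemma main_lemma (cs : List Char) : ∀ (k pos : Int),
    (proc (mySplit cs) k pos).flatten = sel cs pos (PySem.Int.mod k 2) := by
  induction cs with
  | nil => intro k pos; simp [mySplit, proc, eo, sel]
  | cons c rest ih =>
    intro k pos
    by_cases hc : c = '1'
    · subst hc
      rw [mySplit_one, sel_one]
      have h1 : 1 - PySem.Int.mod k 2 = PySem.Int.mod (k + 1) 2 := by
        rw [mod2, mod2]; omega
      rw [h1, ← ih (k + 1) (pos + 1)]
      simp [proc, eo]
    · rcases h : mySplit rest with _ | ⟨x, xs⟩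
      · exact absurd h (mySplit_ne_nil rest)
      · rw [mySplit_cons c rest hc, h]
        simp only [consHead, proc, List.flatten_cons]
        have hrec := ih k (pos + 1)
        rw [h] at hrec
        simp only [proc, List.flatten_cons] at hrec
        have hlen : pos + (((c :: x).length : Nat) : Int) + 1
            = pos + 1 + ((x.length : Nat) : Int) + 1 := by
          simp; omega
        rw [hlen]
        rcases Int.emod_two_eq (k - pos) with ht | ht
        · have ht0 : PySem.Int.mod (k - pos) 2 = 0 := by rw [mod2]; omega
          have ht1 : PySem.Int.mod (k - (pos + 1)) 2 = 1 := by rw [mod2]; omega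
          have hm : PySem.Int.mod pos 2 = PySem.Int.mod k 2 := by
            rw [mod2, mod2]; omega
          rw [sel_take c rest pos (PySem.Int.mod k 2) hc hm]
          rw [ht1] at hrec
          simp only [Int.toNat_one] at hrec
          rw [ht0]
          simp only [Int.toNat_zero, List.drop_zero, eo_cons, List.cons_append]
          rw [hrec]
        · have ht0 : PySem.Int.mod (k - pos) 2 = 1 := by rw [mod2]; omega
          have ht1 : PySem.Int.mod (k - (pos + 1)) 2 = 0 := by rw [mod2]; omega
          have hm : ¬ PySem.Int.mod pos 2 = PySem.Int.mod k 2 := by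
            rw [mod2, mod2]; omega
          rw [sel_skip c rest pos (PySem.Int.mod k 2) hc hm]
          rw [ht1] at hrec
          simp only [Int.toNat_zero, List.drop_zero] at hrec
          rw [ht0]
          simp only [Int.toNat_one, List.drop_one, List.tail_cons]
          rw [hrec]

-- ===== VERDICT (by name: the statement is the Claim_ definition above) =====
theorem solution_spec : Claim_equal_solution := by
  intro code _
  unfold Spec_solution solution solution_alt
  rw [a_loop code.toList 0 [] 0 (Or.inl rfl)]
  show _ = String.ofList _
  rw [splitOn_eq, b_loop, join_nil_flatten]
  simp only [List.nil_append]
  rw [main_lemma code.toList 0 0]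
  rfl
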